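-- pv_equiv track=rewrite | github.com/antoinenguyen27/agentUQ | src/uq_runtime/analysis/segmentation.py | _balanced_delimiters
-- ===== SOURCE A (Python) =====
-- def _balanced_delimiters(text: str) -> bool:
--     pairs = {"(": ")", "[": "]", "{": "}"}
--     closing = {value: key for key, value in pairs.items()}
--     stack: list[str] = []
--     quote: str | None = None
--     index = 0
--     while index < len(text):
--         char = text[index]
--         if quote is not None:
--             if char == "\\":
--                 index += 2
--                 continue
--             if char == quote:
--                 quote = None
--             index += 1
--             continue
--         if char in {"'", '"'}:
--             quote = char
--             index += 1
--             continue
--         if char in pairs: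
--             stack.append(char)
--         elif char in closing:
--             if not stack or stack[-1] != closing[char]:
--                 return False
--             stack.pop()
--         index += 1
--     return quote is None and not stack
-- ===== SOURCE B (Python) =====
-- def _balanced_delimiters(text: str) -> bool:
--     # Pass 1: strip quoted regions, collecting bracket chars seen outside quotes.
--     brackets = []
--     quote = None
--     i = 0
--     n = len(text)
--     while i < n:
--         ch = text[i]
--         if quote is None:
--             if ch in "'\"":
--                 quote = ch
--             elif ch in "([{)]}":
--                 brackets.append(ch)
--             i += 1
--         elif ch == "\\":
--             i += 2
--         else:
--             if ch == quote:
--                 quote = None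
--             i += 1
--     if quote is not None:
--         return False
--     # Pass 2: plain stack match over the collected bracket characters.
--     openers = {")": "(", "]": "[", "}": "{"}
--     stack = []
--     for ch in brackets:
--         if ch in "([{":
--             stack.append(ch)
--         elif not stack or stack[-1] != openers[ch]:
--             return False
--         else:
--             stack.pop()
--     return not stack
-- ===== Notes on version B (the rewrite author's own statement) =====
-- stated objective: alternative
-- what changed: Replaced the single combined quote-tracking/stack loop with two separate passes: a first scan that only handles quote/escape state and extracts the bracket characters outside quotes, then a plain stack match over that extracted list.
import Mathlib
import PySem

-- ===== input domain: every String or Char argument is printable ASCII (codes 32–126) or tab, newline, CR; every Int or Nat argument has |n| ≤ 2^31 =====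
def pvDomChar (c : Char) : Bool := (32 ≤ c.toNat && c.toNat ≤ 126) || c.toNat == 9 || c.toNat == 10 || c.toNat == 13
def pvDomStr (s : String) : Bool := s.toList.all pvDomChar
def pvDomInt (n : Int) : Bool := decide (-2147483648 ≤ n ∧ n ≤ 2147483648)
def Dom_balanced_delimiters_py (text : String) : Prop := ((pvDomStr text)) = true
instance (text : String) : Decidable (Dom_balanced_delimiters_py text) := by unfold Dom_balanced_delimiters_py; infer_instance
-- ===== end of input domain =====

-- B replaces A's single combined loop by two passes (quote-stripping scan, then a stack match); same values everywhere (objective: alternative).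

-- ===== PORT A =====
-- A's while loop over the index, carried as recursion over the remaining characters.
-- The Python list `stack` (append/pop/[-1] at the end) is carried top-first (head = top).
def loopA : List Char → List Char → Option Char → Bool
  | [], stack, quote => quote.isNone && stack.isEmpty
  | c :: rest, stack, quote =>
    match quote with
    | some q =>
      if c == '\\' then
        -- index += 2: skip the next character too (even past end-of-string)
        match rest with
        | [] => loopA [] stack (some q)
        | _ :: rest2 => loopA rest2 stack (some q)
      else if c == q then loopA rest stack none
      else loopA rest stack (some q)
    | none =>
      if c == '\'' || c == '"' then loopA rest stack (some c)
      else if c == '(' || c == '[' || c == '{' then loopA rest (c :: stack) none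
      else if c == ')' || c == ']' || c == '}' then
        match stack with
        | [] => false
        | top :: stack' =>
          -- closing[char] is the matching opener
          if top != (if c == ')' then '(' else if c == ']' then '[' else '{') then false
          else loopA rest stack' none
      else loopA rest stack none

def balanced_delimiters_py (text : String) : Bool := loopA text.toList [] none

-- ===== PORT B =====
-- Pass 1: scan tracking only quote/escape state; collect brackets outside quotes.
-- Returns none when the scan ends still inside a quote.
def collectB : List Char → Option Char → Option (List Char)
  | [], quote => if quote.isSome then none else some []
  | c :: rest, quote =>
    match quote with
    | none =>
      if c == '\'' || c == '"' then collectB rest (some c)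
      else if c == '(' || c == '[' || c == '{' || c == ')' || c == ']' || c == '}' then
        (collectB rest none).map (c :: ·)
      else collectB rest none
    | some q =>
      if c == '\\' then
        match rest with
        | [] => collectB [] (some q)
        | _ :: rest2 => collectB rest2 (some q)
      else if c == q then collectB rest none
      else collectB rest (some q)

-- Pass 2: plain stack match over the collected bracket characters (head = top).
def matchB : List Char → List Char → Bool
  | [], stack => stack.isEmpty
  | c :: rest, stack =>
    if c == '(' || c == '[' || c == '{' then matchB rest (c :: stack)
    else
      match stack with
      | [] => false
      | top :: stack' =>
        if top != (if c == ')' then '(' else if c == ']' then '[' else '{') then false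
        else matchB rest stack'

def balanced_delimiters_py_alt (text : String) : Bool :=
  match collectB text.toList none with
  | none => false
  | some bs => matchB bs []

-- ===== PRECONDITION & SPEC =====
def Spec_balanced_delimiters_py (text : String) (out : Bool) : Prop := out = balanced_delimiters_py_alt text
instance (text : String) (out : Bool) : Decidable (Spec_balanced_delimiters_py text out) := by unfold Spec_balanced_delimiters_py; infer_instance

-- ===== CLAIM (what is proved, stated in full; the proofs are below) =====
def Claim_equal_balanced_delimiters_py : Prop := ∀ (text : String), Dom_balanced_delimiters_py text → Spec_balanced_delimiters_py text (balanced_delimiters_py text)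

-- ===== LEMMAS AND PROOFS =====

theorem match_false_const (o : Option (List Char)) :
    (match o with
     | none => false
     | some _ => false) = false := by
  cases o <;> rfl

theorem match_map_matchB (o : Option (List Char)) (c : Char) (stack : List Char) :
    (match o.map (c :: ·) with
     | none => false
     | some bs => matchB bs stack) =
      (match o with
       | none => false
       | some bs => matchB (c :: bs) stack) := by
  cases o <;> rfl

-- A's combined loop equals B's two passes, for any carried stack and quote state.
theorem loopA_eq_passes (cs : List Char) (stack : List Char) (quote : Option Char) :
    loopA cs stack quote =
      (match collectB cs quote with
       | none => false
       | some bs => matchB bs stack) := by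
  induction cs, stack, quote using loopA.induct
  case case1 st qu =>
    cases qu <;> simp [loopA, collectB, matchB]
  all_goals
    rw [loopA.eq_def, collectB.eq_def]
    simp_all [matchB, match_map_matchB, match_false_const]
-- ===== VERDICT (by name: the statement is the Claim_ definition above) =====
theorem balanced_delimiters_py_spec : Claim_equal_balanced_delimiters_py := by
  intro text _
  unfold Spec_balanced_delimiters_py balanced_delimiters_py balanced_delimiters_py_alt
  exact loopA_eq_passes text.toList [] none
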